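-- pv_equiv track=rewrite | github.com/ahans30/goldfish-loss | scripts/prepare_hf.py | prepare_ultrachat_assistant
-- ===== SOURCE A (Python) =====
-- def prepare_ultrachat_assistant(row, **kwargs):
--     dialog_turns = ""
--     for i in range(len(row["data"])):
--         curr_data = row["data"][i]
--
--         if curr_data.isspace() or curr_data == "":
--             return ""
--
--         if i % 2 == 0:
--             dialog_turns += f"<|user|>\n{curr_data}"
--         else:
--             dialog_turns += f"<|assistant|>\n{curr_data}"
--
--         if i != len(row["data"]) - 1:
--             dialog_turns += "\n"
--
--     return dialog_turns
-- ===== SOURCE B (Python) =====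
-- def prepare_ultrachat_assistant(row, **kwargs):
--     data = row["data"]
--     if any(d.isspace() or d == "" for d in data):
--         return ""
--     parts = [("<|user|>\n" if i % 2 == 0 else "<|assistant|>\n") + d
--              for i, d in enumerate(data)]
--     return "\n".join(parts)
-- ===== Notes on version B (the rewrite author's own statement) =====
-- stated objective: simpler
-- what changed: Replaces the single interleaved guard+accumulate loop (with its last-element separator branch and early return) by a separate validation pass followed by a tag-and-join formatting pass ('\n'.join over a comprehension).
import Mathlib
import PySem

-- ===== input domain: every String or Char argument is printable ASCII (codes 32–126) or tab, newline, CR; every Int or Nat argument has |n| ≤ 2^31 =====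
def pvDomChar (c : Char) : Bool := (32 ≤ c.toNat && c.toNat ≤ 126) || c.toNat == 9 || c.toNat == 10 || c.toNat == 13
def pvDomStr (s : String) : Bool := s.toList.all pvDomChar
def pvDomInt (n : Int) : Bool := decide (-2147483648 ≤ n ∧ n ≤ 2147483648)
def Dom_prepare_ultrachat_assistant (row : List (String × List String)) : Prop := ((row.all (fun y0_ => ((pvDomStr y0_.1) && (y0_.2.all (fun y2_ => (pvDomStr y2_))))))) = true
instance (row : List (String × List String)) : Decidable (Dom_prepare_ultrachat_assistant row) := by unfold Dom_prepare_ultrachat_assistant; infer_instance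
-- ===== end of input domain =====

-- B replaces A's interleaved guard+accumulate loop (with its last-element separator branch
-- and early return) by a separate validation pass followed by a tag-and-join formatting pass.


-- ===== PORT A =====
def pvUserTag : List Char := ['<', '|', 'u', 's', 'e', 'r', '|', '>', '\n']
def pvAsstTag : List Char := ['<', '|', 'a', 's', 's', 'i', 's', 't', 'a', 'n', 't', '|', '>', '\n']

-- A's loop: for i in range(len(data)): early return "" on empty/whitespace turn,
-- else append tag+turn, and a "\n" separator unless i is the last index.
def pvLoopA (data : List (List Char)) (i : Nat) (acc : List Char) : List Char :=
  if h : i < data.length then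
    let curr := data[i]
    if PySem.Chars.strIsspace curr || curr == [] then []
    else
      let acc1 := acc ++ (if i % 2 == 0 then pvUserTag ++ curr else pvAsstTag ++ curr)
      let acc2 := if i != data.length - 1 then acc1 ++ ['\n'] else acc1
      pvLoopA data (i + 1) acc2
  else acc
termination_by data.length - i

def prepare_ultrachat_assistant (row : List (String × List String)) : String :=
  match PySem.Dict.get? (PySem.Dict.mk row) "data" with
  | some data => String.ofList (pvLoopA (data.map String.toList) 0 [])
  | none => ""   -- unreachable under Pre_ (Python raises KeyError)

-- ===== PORT B =====
def prepare_ultrachat_assistant_alt (row : List (String × List String)) : String :=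
  match PySem.Dict.get? (PySem.Dict.mk row) "data" with
  | some data0 =>
      let data := data0.map String.toList
      if data.any (fun d => PySem.Chars.strIsspace d || d == []) then ""
      else
        String.ofList (PySem.Chars.join ['\n']
          ((PySem.List.enumerate data 0).map
            (fun p => (if p.1 % 2 == 0 then pvUserTag else pvAsstTag) ++ p.2)))
  | none => ""   -- unreachable under Pre_ (Python raises KeyError)

-- ===== PRECONDITION & SPEC =====
-- Pre_ excludes rows without a "data" key, on which Python A raises KeyError.
def Pre_prepare_ultrachat_assistant (row : List (String × List String)) : Prop :=
  "data" ∈ row.map Prod.fst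
instance (row : List (String × List String)) : Decidable (Pre_prepare_ultrachat_assistant row) := by unfold Pre_prepare_ultrachat_assistant; infer_instance
def pvWitness_prepare_ultrachat_assistant : (List (String × List String)) :=
  [("data", ["Hi there", "Hello!"])]

def Spec_prepare_ultrachat_assistant (row : List (String × List String)) (out : String) : Prop := out = prepare_ultrachat_assistant_alt row
instance (row : List (String × List String)) (out : String) : Decidable (Spec_prepare_ultrachat_assistant row out) := by unfold Spec_prepare_ultrachat_assistant; infer_instance

-- ===== CLAIM (what is proved, stated in full; the proofs are below) =====
def Claim_equal_prepare_ultrachat_assistant : Prop := ∀ (row : List (String × List String)), Dom_prepare_ultrachat_assistant row → Pre_prepare_ultrachat_assistant row → Spec_prepare_ultrachat_assistant row (prepare_ultrachat_assistant row)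

-- ===== LEMMAS AND PROOFS =====

def pvPart (p : Int × List Char) : List Char :=
  (if p.1 % 2 == 0 then pvUserTag else pvAsstTag) ++ p.2

lemma pvParity (i : Nat) : (((i : Int)) % 2 == 0) = ((i % 2 == 0 : Bool)) := by
  rcases Nat.mod_two_eq_zero_or_one i with h | h
  · have h2 : (i : Int) % 2 = 0 := by omega
    simp [h, h2]
  · have h2 : (i : Int) % 2 = 1 := by omega
    simp [h, h2]

lemma pvLoopA_spec (data : List (List Char)) :
    ∀ (i : Nat) (acc : List Char),
      pvLoopA data i acc =
        if (data.drop i).any (fun d => PySem.Chars.strIsspace d || d == []) then []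
        else acc ++ PySem.Chars.join ['\n']
          ((PySem.List.enumerate (data.drop i) (i : Int)).map pvPart) := by
  suffices h : ∀ (k i : Nat) (acc : List Char), data.length - i ≤ k →
      pvLoopA data i acc =
        if (data.drop i).any (fun d => PySem.Chars.strIsspace d || d == []) then []
        else acc ++ PySem.Chars.join ['\n']
          ((PySem.List.enumerate (data.drop i) (i : Int)).map pvPart) by
    intro i acc; exact h (data.length - i) i acc le_rfl
  intro k
  induction k with
  | zero =>
    intro i acc hk
    have hge : data.length ≤ i := by omega
    rw [pvLoopA, dif_neg (by omega)]
    simp [List.drop_eq_nil_of_le hge, PySem.List.enumerate_nil, PySem.Chars.join_nil]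
  | succ k ih =>
    intro i acc hk
    by_cases hi : i < data.length
    · rw [pvLoopA, dif_pos hi]
      have hdrop : data.drop i = data[i] :: data.drop (i + 1) := List.drop_eq_getElem_cons hi
      by_cases hbad : (PySem.Chars.strIsspace data[i] || data[i] == []) = true
      · have hany : ((data.drop i).any (fun d => PySem.Chars.strIsspace d || d == [])) = true := by
          rw [hdrop]; simp only [List.any_cons, hbad, Bool.true_or]
        rw [if_pos hbad, if_pos hany]
      · rw [if_neg hbad]
        have hbad' : (PySem.Chars.strIsspace data[i] || data[i] == []) = false := by
          simpa using hbad
        rw [ih (i + 1) _ (by omega), hdrop]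
        simp only [List.any_cons, hbad', Bool.false_or, PySem.List.enumerate_cons,
          List.map_cons]
        by_cases htail : ((data.drop (i + 1)).any (fun d => PySem.Chars.strIsspace d || d == [])) = true
        · rw [if_pos htail, if_pos htail]
        · rw [if_neg htail, if_neg htail]
          rcases hcase : data.drop (i + 1) with _ | ⟨d, ds⟩
          · -- last element: i = data.length - 1, no trailing separator
            have hlastEq : i = data.length - 1 := by
              have := List.drop_eq_nil_iff.mp hcase
              omega
            have hlast : (i != data.length - 1) = false := by simp [hlastEq]
            simp only [hlast, Bool.false_eq_true, if_false, PySem.List.enumerate_nil,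
              List.map_nil, PySem.Chars.join_nil, PySem.Chars.join_singleton,
              List.append_nil, pvPart, pvParity i]
            split <;> simp
          · -- not last: separator '\n' after this part
            have hne : (i != data.length - 1) = true := by
              have hlen : i + 1 < data.length := by
                have := congrArg List.length hcase
                simp at this
                omega
              simp; omega
            have hcast : ((i + 1 : Nat) : Int) = (i : Int) + 1 := by push_cast; ring
            rw [if_pos hne]
            simp only [PySem.List.enumerate_cons, List.map_cons]
            rw [PySem.Chars.join_cons_cons]
            simp only [pvPart, pvParity i, hcast]
            split <;> simp [List.append_assoc]
    · have hge : data.length ≤ i := by omega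
      rw [pvLoopA, dif_neg hi]
      simp [List.drop_eq_nil_of_le hge, PySem.List.enumerate_nil, PySem.Chars.join_nil]

theorem prepare_ultrachat_assistant_spec : Claim_equal_prepare_ultrachat_assistant := by
  intro row _ hpre
  unfold Spec_prepare_ultrachat_assistant prepare_ultrachat_assistant prepare_ultrachat_assistant_alt
  cases hg : PySem.Dict.get? (PySem.Dict.mk row) "data" with
  | none =>
      exfalso
      have := (PySem.Dict.get?_eq_none_iff_not_mem_keys (d := PySem.Dict.mk row) (k := "data")).mp hg
      exact this hpre
  | some data =>
      simp only [pvLoopA_spec (data.map String.toList) 0 [], List.drop_zero, List.nil_append,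
        Int.natCast_zero]
      split <;> rfl
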